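-- pv_equiv track=rewrite | github.com/marcusjoshm/percell4 | src/percell4/workflows/channels.py | intersect_channels
-- ===== SOURCE A (Python) =====
-- ChannelSource = tuple[str, list[str]]
--
-- def intersect_channels(
--     sources: list[ChannelSource],
-- ) -> tuple[list[str], list[str]]:
--     """Compute the channel intersection and identify outlier datasets.
--
--     Parameters
--     ----------
--     sources
--         List of ``(dataset_name, channel_names)`` tuples. May be empty.
--
--     Returns
--     -------
--     intersection
--         Channel names present in every source, in the order they appear in
--         the *first* source. Empty list if no common channels exist or if
--         ``sources`` itself is empty.
--     outliers
--         Dataset names that have **zero** channels in common with the other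
--         sources. These are the datasets the user probably meant to leave
--         out (wrong folder, corrupt metadata, etc.). The config dialog
--         prompts the user to drop them and continue or abort. Always empty
--         if ``sources`` is empty or has a single entry.
--
--     Semantics
--     ---------
--     - If every source shares at least one channel, ``outliers`` is empty and
--       ``intersection`` is the common set.
--     - If at least one source has zero overlap with the rest, the function
--       first computes the intersection over the *other* sources, then
--       classifies as outliers any source with zero channels in that
--       intersection. This handles the typical "user dragged in one wrong
--       folder" case cleanly.
--     - If the full intersection is empty *and* no single-source outlier
--       explains it (every source contributes to the mismatch), all sources
--       are returned as outliers and ``intersection`` is empty.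
--     """
--     if not sources:
--         return [], []
--
--     if len(sources) == 1:
--         only_name, only_channels = sources[0]
--         # De-dupe while preserving order.
--         seen: set[str] = set()
--         intersection: list[str] = []
--         for ch in only_channels:
--             if ch not in seen:
--                 seen.add(ch)
--                 intersection.append(ch)
--         return intersection, []
--
--     first_order = sources[0][1]
--     sets = [set(channels) for _, channels in sources]
--     full_intersection = set.intersection(*sets)
--
--     if full_intersection:
--         return _ordered(first_order, full_intersection), []
--
--     # No full intersection — try to recover by dropping outliers.
--     # An outlier is a source whose channels don't overlap with any other.
--     outliers: list[str] = []
--     for i, (name, ch_list) in enumerate(sources):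
--         own = set(ch_list)
--         others = [sets[j] for j in range(len(sources)) if j != i]
--         if not any(own & o for o in others):
--             outliers.append(name)
--
--     if outliers:
--         remaining_sets = [
--             sets[i] for i, (name, _) in enumerate(sources) if name not in outliers
--         ]
--         remaining_order = next(
--             (ch_list for name, ch_list in sources if name not in outliers),
--             [],
--         )
--         if remaining_sets:
--             kept = set.intersection(*remaining_sets)
--             return _ordered(remaining_order, kept), outliers
--         return [], outliers
--
--     # Every source has *some* overlap with *some* other source, but there is
--     # no single channel common to all. The run can't proceed with any subset
--     # without a real policy call from the user — report all as outliers so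
--     # the dialog surfaces it.
--     return [], [name for name, _ in sources]
--
-- def _ordered(reference: list[str], keep: set[str]) -> list[str]:
--     """Filter ``reference`` to entries in ``keep``, preserving first-occurrence order."""
--     seen: set[str] = set()
--     out: list[str] = []
--     for ch in reference:
--         if ch in keep and ch not in seen:
--             seen.add(ch)
--             out.append(ch)
--     return out
-- ===== SOURCE B (Python) =====
-- def _count(lists):
--     """channel -> number of lists (sources) containing it; each list is duplicate-free."""
--     counts = {}
--     for chs in lists:
--         for ch in chs:
--             counts[ch] = counts.get(ch, 0) + 1
--     return counts
--
--
-- def intersect_channels(sources):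
--     """Counter-based re-implementation: one channel->source-count pass replaces
--     A's per-source pairwise overlap scans and its chained set intersections."""
--     if not sources:
--         return [], []
--     names = [name for name, _ in sources]
--     uniq = [list(dict.fromkeys(chs)) for _, chs in sources]
--     n = len(sources)
--     if n == 1:
--         return uniq[0], []
--     counts = _count(uniq)
--     intersection = [ch for ch in uniq[0] if counts.get(ch, 0) == n]
--     if intersection:
--         return intersection, []
--     pairs = list(zip(names, uniq))
--     outliers = [name for name, chs in pairs
--                 if all(counts.get(ch, 0) == 1 for ch in chs)]
--     if not outliers:
--         return [], names
--     rem = [chs for name, chs in pairs if name not in outliers]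
--     if not rem:
--         return [], outliers
--     counts2 = _count(rem)
--     m = len(rem)
--     return [ch for ch in rem[0] if counts2.get(ch, 0) == m], outliers
-- ===== Notes on version B (the rewrite author's own statement) =====
-- stated objective: alternative
-- what changed: Replaces A's chained set intersections and per-source pairwise 'overlaps no other source' scans with a single channel->source-count dictionary: a channel is common iff its count equals the number of sources, and a source is an outlier iff every one of its channels has count 1.
import Mathlib
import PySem

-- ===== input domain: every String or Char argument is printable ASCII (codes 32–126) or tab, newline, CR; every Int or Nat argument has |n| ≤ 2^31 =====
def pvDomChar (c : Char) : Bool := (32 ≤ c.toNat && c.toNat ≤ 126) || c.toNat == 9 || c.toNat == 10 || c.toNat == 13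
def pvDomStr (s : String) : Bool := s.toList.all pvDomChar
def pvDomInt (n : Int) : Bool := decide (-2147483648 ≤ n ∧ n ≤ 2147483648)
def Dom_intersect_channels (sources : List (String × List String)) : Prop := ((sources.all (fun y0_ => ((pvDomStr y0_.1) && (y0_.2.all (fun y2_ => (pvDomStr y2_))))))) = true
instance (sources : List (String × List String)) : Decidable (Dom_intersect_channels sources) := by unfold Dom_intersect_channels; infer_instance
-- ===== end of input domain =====

-- B replaces A's chained set intersections and per-source pairwise overlap scans by a single
-- channel -> source-count dictionary (one pass); proved to return exactly A's value on every input.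


-- ===== PORT A =====
-- _ordered(reference, keep): filter `reference` to `keep`, de-duping with a seen-set
def pvOrdered (reference : List String) (keep : PySem.Set String) : List String :=
  (reference.foldl (fun (st : PySem.Set String × List String) ch =>
      if keep.contains ch && !(st.1.contains ch) then (PySem.Set.add st.1 ch, st.2 ++ [ch]) else st)
    (([] : PySem.Set String), ([] : List String))).2

-- loop body condition of A's outlier scan: own = set(ch_list); others = [sets[j] for j != i];
-- not any(own & o for o in others)
def pvNoOverlap (sets : List (PySem.Set String)) (n : Nat) (p : Int × (String × List String)) : Bool :=
  let own := PySem.Set.ofList p.2.2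
  let others := (PySem.List.pyRange 0 (n : Int) 1).filterMap
      (fun j => if j ≠ p.1 then PySem.List.pyGet? sets j else none)
  !(others.any (fun o => !(PySem.Set.inter own o).isEmpty))

def intersect_channels (sources : List (String × List String)) : List String × List String :=
  if sources = [] then ([], [])
  else if sources.length = 1 then
    -- de-dupe while preserving order, with a seen-set
    let only := sources.headD ("", [])
    let res := only.2.foldl (fun (st : PySem.Set String × List String) ch =>
        if !(st.1.contains ch) then (PySem.Set.add st.1 ch, st.2 ++ [ch]) else st)
      (([] : PySem.Set String), ([] : List String))
    (res.2, [])
  else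
    let first_order := (sources.headD ("", [])).2
    let sets := sources.map (fun p => PySem.Set.ofList p.2)
    -- set.intersection(*sets): left fold of &; exact as a set (consumed only via membership / emptiness)
    let full_intersection := sets.tail.foldl PySem.Set.inter (sets.headD ([] : PySem.Set String))
    if full_intersection ≠ [] then (pvOrdered first_order full_intersection, [])
    else
      let outliers := (PySem.List.enumerate sources).foldl
          (fun acc p => if pvNoOverlap sets sources.length p then acc ++ [p.2.1] else acc) []
      if outliers ≠ [] then
        let remaining_sets := (PySem.List.enumerate sources).filterMap
            (fun p => if !(outliers.contains p.2.1) then PySem.List.pyGet? sets p.1 else none)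
        let remaining_order := (sources.filterMap
            (fun s => if !(outliers.contains s.1) then some s.2 else none)).headD []
        if remaining_sets ≠ [] then
          let kept := remaining_sets.tail.foldl PySem.Set.inter
              (remaining_sets.headD ([] : PySem.Set String))
          (pvOrdered remaining_order kept, outliers)
        else ([], outliers)
      else ([], sources.map (fun s => s.1))

-- ===== PORT B =====
-- _count(lists): channel -> number of lists containing it
def pvCount (lists : List (List String)) : PySem.Dict String Int :=
  lists.foldl (fun d chs => chs.foldl (fun d ch => d.insert ch (d.getD ch 0 + 1)) d) PySem.Dict.empty

def intersect_channels_alt (sources : List (String × List String)) : List String × List String :=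
  if sources = [] then ([], [])
  else
    let names := sources.map (fun p => p.1)
    let uniq := sources.map (fun p => PySem.List.dedup p.2)
    let n := sources.length
    if n = 1 then (uniq.headD [], [])
    else
      let counts := pvCount uniq
      let intersection := (uniq.headD []).filter (fun ch => counts.getD ch 0 == (n : Int))
      if intersection ≠ [] then (intersection, [])
      else
        let pairs := names.zip uniq
        let outliers := (pairs.filter (fun pr => pr.2.all (fun ch => counts.getD ch 0 == 1))).map
            (fun pr => pr.1)
        if outliers = [] then ([], names)
        else
          let rem := (pairs.filter (fun pr => !(outliers.contains pr.1))).map (fun pr => pr.2)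
          if rem = [] then ([], outliers)
          else
            let counts2 := pvCount rem
            let m := rem.length
            ((rem.headD []).filter (fun ch => counts2.getD ch 0 == (m : Int)), outliers)

-- ===== PRECONDITION & SPEC =====
def Spec_intersect_channels (sources : List (String × List String)) (out : List String × List String) : Prop := out = intersect_channels_alt sources
instance (sources : List (String × List String)) (out : List String × List String) : Decidable (Spec_intersect_channels sources out) := by unfold Spec_intersect_channels; infer_instance

-- ===== CLAIM (what is proved, stated in full; the proofs are below) =====
def Claim_equal_intersect_channels : Prop := ∀ (sources : List (String × List String)), Dom_intersect_channels sources → Spec_intersect_channels sources (intersect_channels sources)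

-- ===== LEMMAS AND PROOFS =====
-- General facts about filter/discard/dedup
lemma pvFilterDiscard {p : String → Bool} (m : List String) (x : String) (h : p x = false) :
    (PySem.Set.discard m x).filter p = m.filter p := by
  simp only [PySem.Set.discard, List.filter_filter]
  apply List.filter_congr
  intro y _
  by_cases hy : y = x
  · subst hy; simp [h]
  · simp [hy]

lemma pvDiscardFilter (m : List String) (p : String → Bool) (x : String) :
    PySem.Set.discard (m.filter p) x = (PySem.Set.discard m x).filter p := by
  simp only [PySem.Set.discard, List.filter_filter]
  apply List.filter_congr
  intro y _
  exact Bool.and_comm _ _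

lemma pvDedupFilter (l : List String) (p : String → Bool) :
    PySem.List.dedup (l.filter p) = (PySem.List.dedup l).filter p := by
  induction l with
  | nil => rfl
  | cons x t ih =>
    simp only [PySem.List.dedup] at *
    by_cases hx : p x = true
    · rw [List.filter_cons_of_pos hx, PySem.Set.ofList_cons, PySem.Set.ofList_cons,
        List.filter_cons_of_pos hx, ih, pvDiscardFilter]
    · have hx' : p x = false := by simpa using hx
      rw [List.filter_cons_of_neg (by simp [hx']), PySem.Set.ofList_cons,
        List.filter_cons_of_neg (by simp [hx']), ih, pvFilterDiscard _ _ hx']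

lemma pvDiscardFilterMerge (m : List String) (x : String) (p : String → Bool) :
    (PySem.Set.discard m x).filter p = m.filter (fun y => p y && !(y == x)) := by
  simp only [PySem.Set.discard, List.filter_filter]

lemma pvContainsAppend (s : List String) (x ch : String) :
    (!(PySem.Set.contains (s ++ [x]) ch)) = (!(PySem.Set.contains s ch) && !(ch == x)) := by
  simp [PySem.Set.contains]
  by_cases h : ch = x <;> simp [h]

lemma pvSeenFold (q : String → Bool) (l : List String) (s : PySem.Set String) (out : List String) :
    (l.foldl (fun (st : PySem.Set String × List String) ch =>
        if q ch && !(st.1.contains ch) then (PySem.Set.add st.1 ch, st.2 ++ [ch]) else st) (s, out)).2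
    = out ++ (PySem.List.dedup (l.filter q)).filter (fun ch => !(PySem.Set.contains s ch)) := by
  induction l generalizing s out with
  | nil => simp
  | cons x t ih =>
    simp only [List.foldl_cons]
    by_cases hq : q x = true
    · by_cases hc : PySem.Set.contains s x = true
      · have hxmem : x ∈ s := by simpa [PySem.Set.contains] using hc
        simp only [hq, hc, Bool.not_true, Bool.and_false, Bool.false_eq_true, if_false]
        rw [ih, List.filter_cons_of_pos hq,
          show PySem.List.dedup (x :: List.filter q t) = PySem.Set.ofList (x :: List.filter q t) from rfl,
          PySem.Set.ofList_cons,
          List.filter_cons_of_neg (by simp [PySem.Set.contains, hxmem]),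
          pvFilterDiscard _ _ (by simp [PySem.Set.contains, hxmem])]
        rfl
      · have hc' : PySem.Set.contains s x = false := by simpa using hc
        have hnx : x ∉ s := by simpa [PySem.Set.contains] using hc'
        have hcond : (q x && !(PySem.Set.contains s x)) = true := by
          simp [PySem.Set.contains, hq, hnx]
        simp only [hcond, if_true]
        have hadd : PySem.Set.add s x = s ++ [x] := by simp [PySem.Set.add, PySem.Set.contains, hnx]
        rw [hadd, ih, List.filter_cons_of_pos hq,
          show PySem.List.dedup (x :: List.filter q t) = PySem.Set.ofList (x :: List.filter q t) from rfl,
          PySem.Set.ofList_cons,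
          List.filter_cons_of_pos (by simp [PySem.Set.contains, hnx]), pvDiscardFilterMerge]
        have hpt : (fun ch => !(PySem.Set.contains (s ++ [x]) ch))
            = (fun ch => !(PySem.Set.contains s ch) && !(ch == x)) := by
          funext ch; exact pvContainsAppend s x ch
        rw [hpt]
        simp [PySem.List.dedup]
    · have hq2 : q x = false := by simpa using hq
      simp only [hq2, Bool.false_and, Bool.false_eq_true, if_false]
      rw [ih, List.filter_cons_of_neg (by simp [hq2])]

lemma pvOrdered_eq (reference : List String) (keep : PySem.Set String) :
    pvOrdered reference keep
      = (PySem.List.dedup reference).filter (fun ch => keep.contains ch) := by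
  unfold pvOrdered
  rw [pvSeenFold (fun ch => keep.contains ch) reference [] []]
  simp [PySem.Set.contains]
  exact pvDedupFilter reference _

lemma pvDedupLoop (l : List String) :
    (l.foldl (fun (st : PySem.Set String × List String) ch =>
        if !(st.1.contains ch) then (PySem.Set.add st.1 ch, st.2 ++ [ch]) else st)
      (([] : PySem.Set String), ([] : List String))).2 = PySem.List.dedup l := by
  have hf : (fun (st : PySem.Set String × List String) ch =>
        if !(st.1.contains ch) then (PySem.Set.add st.1 ch, st.2 ++ [ch]) else st)
      = (fun (st : PySem.Set String × List String) ch =>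
        if (fun _ => true) ch && !(st.1.contains ch) then (PySem.Set.add st.1 ch, st.2 ++ [ch]) else st) := by
    funext st ch; simp
  rw [hf, pvSeenFold (fun _ => true) l [] []]
  simp [PySem.Set.contains]

lemma pvMemFoldlInter (l : List (PySem.Set String)) (init : List String) (ch : String) :
    ch ∈ l.foldl PySem.Set.inter init ↔ ch ∈ init ∧ ∀ s ∈ l, ch ∈ s := by
  induction l generalizing init with
  | nil => simp
  | cons x t ih =>
    simp only [List.foldl_cons, ih, PySem.Set.mem_inter]
    constructor
    · rintro ⟨⟨h1, h2⟩, h3⟩; exact ⟨h1, by simpa [h2] using h3⟩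
    · rintro ⟨h1, h3⟩
      exact ⟨⟨h1, h3 x (by simp)⟩, fun s hs => h3 s (by simp [hs])⟩

lemma pvCountAux (lists : List (List String)) (d : PySem.Dict String Int) (ch : String) :
    (lists.foldl (fun d chs => chs.foldl (fun d ch => d.insert ch (d.getD ch 0 + 1)) d) d).getD ch 0
      = d.getD ch 0 + ((lists.map (fun chs => (chs.count ch : Int))).sum) := by
  induction lists generalizing d with
  | nil => simp
  | cons x t ih =>
    simp only [List.foldl_cons, List.map_cons, List.sum_cons]
    rw [ih, PySem.Dict.getD_foldl_insert_add_one]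
    ring

lemma pvCountDedup (l : List String) (ch : String) :
    (PySem.List.dedup l).count ch = if ch ∈ l then 1 else 0 := by
  by_cases h : ch ∈ l
  · have h1 : (PySem.List.dedup l).count ch ≤ 1 :=
      List.nodup_iff_count_le_one.mp (PySem.List.nodup_dedup l) ch
    have h2 : 0 < (PySem.List.dedup l).count ch :=
      List.count_pos_iff.mpr ((PySem.List.mem_dedup l ch).mpr h)
    rw [if_pos h]; omega
  · rw [if_neg h, List.count_eq_zero]
    simpa [PySem.List.mem_dedup] using h

lemma pvCount_getD (R : List (String × List String)) (ch : String) :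
    (pvCount (R.map (fun s => PySem.List.dedup s.2))).getD ch 0
      = (R.countP (fun s => decide (ch ∈ s.2)) : Int) := by
  unfold pvCount
  rw [pvCountAux, List.map_map]
  have h1 : ((fun chs => (chs.count ch : Int)) ∘ (fun s : String × List String => PySem.List.dedup s.2))
      = (fun s : String × List String => if decide (ch ∈ s.2) = true then (1 : Int) else 0) := by
    funext s
    simp only [Function.comp_apply, pvCountDedup]
    by_cases h : ch ∈ s.2 <;> simp [h]
  rw [h1, PySem.List.sum_map_ite_one_zero]
  simp [PySem.Dict.getD, PySem.Dict.get?_empty]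


lemma pvFilterMapSomeRange {α : Type} (l : List α) :
    (List.range l.length).filterMap (fun k => l[k]?) = l := by
  induction l with
  | nil => simp
  | cons x t ih =>
    rw [List.length_cons, List.range_succ_eq_map, List.filterMap_cons, List.filterMap_map]
    simpa using ih

lemma pvFilterMapRangeNe {α : Type} (l : List α) (i : Nat) :
    (List.range l.length).filterMap (fun k => if k ≠ i then l[k]? else none)
      = l.take i ++ l.drop (i + 1) := by
  induction l generalizing i with
  | nil => simp
  | cons x t ih =>
    rw [List.length_cons, List.range_succ_eq_map, List.filterMap_cons, List.filterMap_map]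
    cases i with
    | zero =>
      simp only [ne_eq, not_true_eq_false, if_false, List.take_zero, List.drop_succ_cons,
        List.drop_zero, List.nil_append]
      have hcong : ∀ k ∈ List.range t.length,
          ((fun k => if k ≠ 0 then (x :: t)[k]? else none) ∘ Nat.succ) k = t[k]? := by
        intro k _; simp
      rw [List.filterMap_congr hcong, pvFilterMapSomeRange]
    | succ i' =>
      have hx : (if (0 : Nat) ≠ i' + 1 then (x :: t)[0]? else none) = some x := by simp
      have hcong : ∀ k ∈ List.range t.length,
          ((fun k => if k ≠ i' + 1 then (x :: t)[k]? else none) ∘ Nat.succ) k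
            = (fun k => if k ≠ i' then t[k]? else none) k := by
        intro k _
        by_cases hk : k = i' <;> simp [hk]
      rw [hx, List.filterMap_congr hcong, ih]
      simp

lemma pvOthersEq (sets : List (PySem.Set String)) (i : Nat) :
    ((PySem.List.pyRange 0 (sets.length : Int) 1).filterMap
        (fun j => if j ≠ (i : Int) then PySem.List.pyGet? sets j else none))
      = sets.take i ++ sets.drop (i + 1) := by
  rw [PySem.List.pyRange_one]
  have h0 : ((sets.length : Int) - 0).toNat = sets.length := by simp
  rw [h0, List.filterMap_map]
  have hcong : ∀ k ∈ List.range sets.length,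
      ((fun j => if j ≠ (i : Int) then PySem.List.pyGet? sets j else none) ∘ (fun k : Nat => (0 : Int) + ↑k)) k
        = (fun k => if k ≠ i then sets[k]? else none) k := by
    intro k _
    by_cases hk : k = i
    · simp [hk]
    · have : ((0 : Int) + (k : Int)) ≠ (i : Int) := by omega
      simp only [Function.comp_apply, this, ne_eq, hk, not_false_eq_true, if_true]
      rw [show (0 : Int) + (k : Int) = (k : Int) by omega, PySem.List.pyGet?_natCast]
  rw [List.filterMap_congr hcong, pvFilterMapRangeNe]

lemma pvCountPOne {α : Type} (l : List α) (p : α → Bool) (i : Nat) (hi : i < l.length)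
    (hpi : p l[i] = true) :
    (l.countP p = 1) ↔ ∀ x ∈ l.take i ++ l.drop (i + 1), p x = false := by
  have hsplit : l = l.take i ++ l[i] :: l.drop (i + 1) := by
    rw [List.getElem_cons_drop hi, List.take_append_drop]
  have h2 : l.countP p = (l.take i).countP p + ((l.drop (i + 1)).countP p + 1) := by
    conv_lhs => rw [hsplit]
    rw [List.countP_append, List.countP_cons, hpi]
    simp
  constructor
  · intro h1 x hx
    have hpx' : p x ≠ true ∨ p x = true := by tauto
    rw [List.mem_append] at hx
    by_contra hpx
    have hpx2 : p x = true := by simpa using hpx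
    rcases hx with hx | hx
    · have : 0 < (l.take i).countP p := List.countP_pos_iff.mpr ⟨x, hx, hpx2⟩
      omega
    · have : 0 < (l.drop (i + 1)).countP p := List.countP_pos_iff.mpr ⟨x, hx, hpx2⟩
      omega
  · intro h
    have h1 : (l.take i).countP p = 0 :=
      List.countP_eq_zero.mpr (fun a ha => by simp [h a (by simp [ha])])
    have h3 : (l.drop (i + 1)).countP p = 0 :=
      List.countP_eq_zero.mpr (fun a ha => by simp [h a (by simp [ha])])
    omega

lemma pvFilterMapEnumSnd {α β : Type} (l : List α) (f : α → Option β) :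
    ∀ s, (PySem.List.enumerate l s).filterMap (fun p => f p.2) = l.filterMap f := by
  induction l with
  | nil => intro s; rfl
  | cons x t ih =>
    intro s
    rw [PySem.List.enumerate_cons, List.filterMap_cons, List.filterMap_cons]
    cases f x <;> simp [ih]

lemma pvFilterEnumSndMap {α β : Type} (l : List α) (q : α → Bool) (g : α → β) :
    ∀ s, ((PySem.List.enumerate l s).filter (fun p => q p.2)).map (fun p => g p.2)
      = (l.filter q).map g := by
  induction l with
  | nil => intro s; rfl
  | cons x t ih =>
    intro s
    rw [PySem.List.enumerate_cons, List.filter_cons, List.filter_cons]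
    by_cases hx : q x = true <;> simp [hx, ih]

lemma pvFilterMapIf {α β : Type} (l : List α) (c : α → Bool) (g : α → β) :
    l.filterMap (fun x => if c x then some (g x) else none) = (l.filter c).map g := by
  induction l with
  | nil => rfl
  | cons x t ih =>
    rw [List.filterMap_cons, List.filter_cons]
    by_cases hx : c x = true <;> simp [hx, ih]

lemma pvNoOverlapIff (sets : List (PySem.Set String)) (n : Nat) (i : Int) (nm : String) (chs : List String) :
    pvNoOverlap sets n (i, nm, chs) = true ↔
      ∀ o ∈ ((PySem.List.pyRange 0 (n : Int) 1).filterMap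
          (fun j => if j ≠ i then PySem.List.pyGet? sets j else none)),
        PySem.Set.inter (PySem.Set.ofList chs) o = [] := by
  unfold pvNoOverlap
  simp
  constructor
  · intro h o x hx0 hxn hxi hget
    have h2 := h x hx0 hxn
    rw [if_neg hxi, hget] at h2
    simpa [List.isEmpty_iff] using h2
  · intro h x hx0 hxn
    by_cases hxi : x = i
    · rw [if_pos hxi]
    · rw [if_neg hxi]
      cases hget : PySem.List.pyGet? sets x with
      | none => rfl
      | some o => simpa [List.isEmpty_iff] using h o x hx0 hxn hxi hget

lemma pvNoOverlapEq (sources : List (String × List String)) :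
    ∀ p ∈ PySem.List.enumerate sources 0,
      pvNoOverlap (sources.map (fun s => PySem.Set.ofList s.2)) sources.length p
        = (PySem.List.dedup p.2.2).all
            (fun ch => (pvCount (sources.map (fun s => PySem.List.dedup s.2))).getD ch 0 == 1) := by
  intro p hp
  rw [PySem.List.mem_enumerate_iff] at hp
  obtain ⟨k, hk, hpk⟩ := hp
  subst hpk
  cases hsk : sources[k] with
  | mk nm chs =>
  rw [Bool.eq_iff_iff, pvNoOverlapIff]
  have hlen2 : ((sources.length : Int)) = (((sources.map (fun s => PySem.Set.ofList s.2)).length : Int)) := by simp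
  simp only [zero_add]
  rw [hlen2, pvOthersEq]
  rw [← List.map_take, ← List.map_drop, ← List.map_append]
  rw [List.all_eq_true]
  constructor
  · intro h ch hch
    rw [PySem.List.mem_dedup] at hch
    rw [beq_iff_eq, pvCount_getD]
    have hone : sources.countP (fun s => decide (ch ∈ s.2)) = 1 := by
      rw [pvCountPOne sources _ k hk (by simp [hsk, hch])]
      intro x hx
      have h2 := h (PySem.Set.ofList x.2) (List.mem_map_of_mem hx)
      rw [List.eq_nil_iff_forall_not_mem] at h2
      by_contra hpx
      exact h2 ch ((PySem.Set.mem_inter _ _ _).mpr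
        ⟨(PySem.Set.mem_ofList _ _).mpr hch, (PySem.Set.mem_ofList _ _).mpr (by simpa using hpx)⟩)
    exact_mod_cast hone
  · intro h o ho
    rw [List.mem_map] at ho
    obtain ⟨s', hs', rfl⟩ := ho
    rw [List.eq_nil_iff_forall_not_mem]
    intro ch hchm
    rw [PySem.Set.mem_inter, PySem.Set.mem_ofList, PySem.Set.mem_ofList] at hchm
    obtain ⟨hch, hchs⟩ := hchm
    have h2 := h ch ((PySem.List.mem_dedup _ _).mpr hch)
    rw [beq_iff_eq, pvCount_getD] at h2
    have hone : sources.countP (fun s => decide (ch ∈ s.2)) = 1 := by exact_mod_cast h2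
    have h3 := (pvCountPOne sources _ k hk (by simp [hsk, hch])).mp hone s' hs'
    simp at h3
    exact h3 hchs

lemma pvInterAllMem (r : String × List String) (R' : List (String × List String)) (ch : String) :
    ch ∈ (((r :: R').map (fun s => PySem.Set.ofList s.2)).tail.foldl PySem.Set.inter
        (((r :: R').map (fun s => PySem.Set.ofList s.2)).headD ([] : PySem.Set String)))
      ↔ ∀ s' ∈ r :: R', ch ∈ s'.2 := by
  simp only [List.map_cons, List.tail_cons, List.headD_cons]
  rw [pvMemFoldlInter]
  constructor
  · rintro ⟨h1, h2⟩ s' hs'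
    rcases List.mem_cons.mp hs' with rfl | hs'
    · exact (PySem.Set.mem_ofList _ _).mp h1
    · exact (PySem.Set.mem_ofList _ _).mp (h2 _ (List.mem_map_of_mem hs'))
  · intro h
    refine ⟨(PySem.Set.mem_ofList _ _).mpr (h r (List.mem_cons_self)), ?_⟩
    intro o ho
    obtain ⟨s', hs', rfl⟩ := List.mem_map.mp ho
    exact (PySem.Set.mem_ofList _ _).mpr (h s' (List.mem_cons_of_mem _ hs'))

lemma pvCountAll (R : List (String × List String)) (ch : String) :
    ((pvCount (R.map (fun s => PySem.List.dedup s.2))).getD ch 0 == (R.length : Int)) = true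
      ↔ ∀ s' ∈ R, ch ∈ s'.2 := by
  rw [beq_iff_eq, pvCount_getD]
  rw [show ((R.countP (fun s => decide (ch ∈ s.2)) : Int) = (R.length : Int))
      ↔ (R.countP (fun s => decide (ch ∈ s.2)) = R.length) from Int.natCast_inj]
  rw [List.countP_eq_length]
  simp

lemma pvBranchEq (r : String × List String) (R' : List (String × List String)) :
    pvOrdered r.2 (((r :: R').map (fun s => PySem.Set.ofList s.2)).tail.foldl PySem.Set.inter
        (((r :: R').map (fun s => PySem.Set.ofList s.2)).headD ([] : PySem.Set String)))
      = (PySem.List.dedup r.2).filter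
          (fun ch => (pvCount ((r :: R').map (fun s => PySem.List.dedup s.2))).getD ch 0
            == (((r :: R').length : Nat) : Int)) := by
  rw [pvOrdered_eq]
  apply List.filter_congr
  intro ch hch
  rw [Bool.eq_iff_iff, PySem.Set.contains_iff, pvInterAllMem, pvCountAll]

lemma pvBranchNil (r : String × List String) (R' : List (String × List String)) :
    ((((r :: R').map (fun s => PySem.Set.ofList s.2)).tail.foldl PySem.Set.inter
        (((r :: R').map (fun s => PySem.Set.ofList s.2)).headD ([] : PySem.Set String))) = [])
      ↔ ((PySem.List.dedup r.2).filter
          (fun ch => (pvCount ((r :: R').map (fun s => PySem.List.dedup s.2))).getD ch 0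
            == (((r :: R').length : Nat) : Int)) = []) := by
  rw [List.eq_nil_iff_forall_not_mem, List.eq_nil_iff_forall_not_mem]
  constructor
  · intro h ch hch
    rw [List.mem_filter] at hch
    obtain ⟨hmem, hcnt⟩ := hch
    exact h ch ((pvInterAllMem r R' ch).mpr ((pvCountAll _ ch).mp hcnt))
  · intro h ch hch
    have hall := (pvInterAllMem r R' ch).mp hch
    have hmem : ch ∈ PySem.List.dedup r.2 :=
      (PySem.List.mem_dedup _ _).mpr (hall r (List.mem_cons_self))
    exact h ch (List.mem_filter.mpr ⟨hmem, (pvCountAll _ ch).mpr hall⟩)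

lemma pvOutliersEq (sources : List (String × List String)) :
    ((PySem.List.enumerate sources).foldl
        (fun acc p => if pvNoOverlap (sources.map (fun p => PySem.Set.ofList p.2)) sources.length p
          then acc ++ [p.2.1] else acc) [])
      = (((sources.map (fun p => p.1)).zip (sources.map (fun p => PySem.List.dedup p.2))).filter
          (fun pr => pr.2.all
            (fun ch => (pvCount (sources.map (fun p => PySem.List.dedup p.2))).getD ch 0 == 1))).map
          (fun pr => pr.1) := by
  rw [PySem.List.foldl_append_if
      (pvNoOverlap (sources.map (fun p => PySem.Set.ofList p.2)) sources.length)
      (fun (x : Int × (String × List String)) => x.2.1) (PySem.List.enumerate sources) []]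
  rw [List.filter_congr (pvNoOverlapEq sources), List.nil_append]
  refine Eq.trans (pvFilterEnumSndMap sources
    (fun (s : String × List String) => (PySem.List.dedup s.2).all
      (fun ch => (pvCount (sources.map (fun s => PySem.List.dedup s.2))).getD ch 0 == 1))
    (fun (s : String × List String) => s.1) 0) ?_
  rw [List.zip_map', List.filter_map, List.map_map]
  rfl

lemma pvRemSetsEq (sources : List (String × List String)) (outliers : List String) :
    ((PySem.List.enumerate sources).filterMap
        (fun p => if !(outliers.contains p.2.1)
          then PySem.List.pyGet? (sources.map (fun p => PySem.Set.ofList p.2)) p.1 else none))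
      = (sources.filter (fun s => !(outliers.contains s.1))).map (fun s => PySem.Set.ofList s.2) := by
  have hc : ((PySem.List.enumerate sources).filterMap
        (fun p => if !(outliers.contains p.2.1)
          then PySem.List.pyGet? (sources.map (fun p => PySem.Set.ofList p.2)) p.1 else none))
      = ((PySem.List.enumerate sources).filterMap
        (fun (p : Int × (String × List String)) => if !(outliers.contains p.2.1)
          then some (PySem.Set.ofList p.2.2) else none)) := by
    apply List.filterMap_congr
    intro p hp
    rw [PySem.List.mem_enumerate_iff] at hp
    obtain ⟨k, hk, rfl⟩ := hp
    by_cases hco : (!(outliers.contains sources[k].1)) = true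
    · simp only [hco, if_true, zero_add, PySem.List.pyGet?_natCast, List.getElem?_map,
        List.getElem?_eq_getElem hk, Option.map_some]
    · have hmem : sources[k].1 ∈ outliers := by simpa using hco
      simp [hmem]
  rw [hc]
  refine Eq.trans (pvFilterMapEnumSnd sources
    (fun (s : String × List String) => if !(outliers.contains s.1)
      then some (PySem.Set.ofList s.2) else none) 0) ?_
  rw [pvFilterMapIf]

lemma pvRemBEq (sources : List (String × List String)) (outliers : List String) :
    (((sources.map (fun p => p.1)).zip (sources.map (fun p => PySem.List.dedup p.2))).filter
        (fun pr => !(outliers.contains pr.1))).map (fun pr => pr.2)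
      = (sources.filter (fun s => !(outliers.contains s.1))).map (fun s => PySem.List.dedup s.2) := by
  rw [List.zip_map', List.filter_map, List.map_map]
  rfl

lemma pvBranchEq2 (sources : List (String × List String)) (h0 : sources ≠ []) :
    pvOrdered (sources.headD ("", [])).2
        ((sources.map (fun s => PySem.Set.ofList s.2)).tail.foldl PySem.Set.inter
          ((sources.map (fun s => PySem.Set.ofList s.2)).headD ([] : PySem.Set String)))
      = ((sources.map (fun s => PySem.List.dedup s.2)).headD []).filter
          (fun ch => (pvCount (sources.map (fun s => PySem.List.dedup s.2))).getD ch 0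
            == ((sources.length : Nat) : Int)) := by
  obtain ⟨r, R', rfl⟩ := List.exists_cons_of_ne_nil h0
  have h := pvBranchEq r R'
  simp only [List.headD_cons, List.map_cons, List.tail_cons] at h ⊢
  exact h

lemma pvBranchNil2 (sources : List (String × List String)) (h0 : sources ≠ []) :
    (((sources.map (fun s => PySem.Set.ofList s.2)).tail.foldl PySem.Set.inter
        ((sources.map (fun s => PySem.Set.ofList s.2)).headD ([] : PySem.Set String))) = [])
      ↔ (((sources.map (fun s => PySem.List.dedup s.2)).headD []).filter
          (fun ch => (pvCount (sources.map (fun s => PySem.List.dedup s.2))).getD ch 0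
            == ((sources.length : Nat) : Int)) = []) := by
  obtain ⟨r, R', rfl⟩ := List.exists_cons_of_ne_nil h0
  have h := pvBranchNil r R'
  simp only [List.headD_cons, List.map_cons, List.tail_cons] at h ⊢
  exact h

lemma pvBranchEqC (r : String × List String) (R' : List (String × List String)) :
    pvOrdered r.2 ((R'.map (fun s => PySem.Set.ofList s.2)).foldl PySem.Set.inter
        (PySem.Set.ofList r.2))
      = (PySem.List.dedup r.2).filter
          (fun ch => (pvCount (PySem.List.dedup r.2 :: R'.map (fun s => PySem.List.dedup s.2))).getD ch 0
            == (((PySem.List.dedup r.2 :: R'.map (fun s => PySem.List.dedup s.2)).length : Nat) : Int)) := by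
  have h := pvBranchEq r R'
  simp only [List.headD_cons, List.map_cons, List.tail_cons, List.length_cons,
    List.length_map] at h ⊢
  exact h

theorem pvMainSpec : ∀ (sources : List (String × List String)),
    intersect_channels sources = intersect_channels_alt sources := by
  intro sources
  unfold intersect_channels intersect_channels_alt
  by_cases h0 : sources = []
  · rw [if_pos h0, if_pos h0]
  · rw [if_neg h0, if_neg h0]
    by_cases h1 : sources.length = 1
    · rw [if_pos h1, if_pos h1]
      obtain ⟨s0, rest, rfl⟩ := List.exists_cons_of_ne_nil h0
      simp only [List.headD_cons, List.map_cons]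
      rw [pvDedupLoop]
    · rw [if_neg h1, if_neg h1]
      by_cases hful : ((sources.map (fun p => PySem.Set.ofList p.2)).tail.foldl PySem.Set.inter
          ((sources.map (fun p => PySem.Set.ofList p.2)).headD ([] : PySem.Set String))) = []
      · rw [if_neg (not_not_intro hful),
          if_neg (not_not_intro ((pvBranchNil2 sources h0).mp hful))]
        rw [pvOutliersEq]
        by_cases ho : ((((sources.map (fun p => p.1)).zip
              (sources.map (fun p => PySem.List.dedup p.2))).filter
                (fun pr => pr.2.all (fun ch =>
                  (pvCount (sources.map (fun p => PySem.List.dedup p.2))).getD ch 0 == 1))).map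
              (fun pr => pr.1)) = []
        · rw [if_neg (not_not_intro ho), if_pos ho]
        · rw [if_pos ho, if_neg ho]
          rw [pvRemSetsEq, pvRemBEq, pvFilterMapIf]
          by_cases hR : (sources.filter (fun s => !((((((sources.map (fun p => p.1)).zip
              (sources.map (fun p => PySem.List.dedup p.2))).filter
                (fun pr => pr.2.all (fun ch =>
                  (pvCount (sources.map (fun p => PySem.List.dedup p.2))).getD ch 0 == 1))).map
              (fun pr => pr.1))).contains s.1))) = []
          · rw [hR]
            simp only [List.map_nil]
            simp
          · obtain ⟨r, R', hRc⟩ := List.exists_cons_of_ne_nil hR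
            rw [hRc]
            simp only [List.map_cons, List.tail_cons, List.headD_cons]
            rw [if_pos (by simp), if_neg (by simp)]
            rw [pvBranchEqC]
      · rw [if_pos hful, if_pos ((not_iff_not.mpr (pvBranchNil2 sources h0)).mp hful)]
        rw [pvBranchEq2 sources h0]

-- ===== VERDICT (by name: the statement is the Claim_ definition above) =====
theorem intersect_channels_spec : Claim_equal_intersect_channels := by
  unfold Claim_equal_intersect_channels
  intro sources _
  unfold Spec_intersect_channels
  exact pvMainSpec sources
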